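-- pv_equiv track=rewrite | github.com/Sirabhop/prompt-builder | main.py | _parse_template_md
-- ===== SOURCE A (Python) =====
-- from typing import Dict, List
--
-- def _parse_template_md(text: str) -> Dict[str, str]:
--     """Parse a prompt-template markdown file into field values.
--
--     Expects H2 headers (## Role, ## Objective, etc.) with content below each.
--     Stops collecting a section when the next H2 or '---' separator appears.
--     """
--     field_map: Dict[str, str] = {
--         "role": "",
--         "objective": "",
--         "tasks": "",
--         "inputs": "",
--         "expected output": "",
--     }
--     current_key: str | None = None
--     lines_buf: List[str] = []
--
--     for line in text.splitlines():
--         stripped = line.strip()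
--
--         if stripped.startswith("## "):
--             if current_key is not None and current_key in field_map:
--                 field_map[current_key] = "\n".join(lines_buf).strip()
--             header = stripped[3:].strip().lower()
--             if header == "prompt":
--                 current_key = None
--                 lines_buf = []
--                 continue
--             current_key = header
--             lines_buf = []
--             continue
--
--         if stripped == "---":
--             if current_key is not None and current_key in field_map:
--                 field_map[current_key] = "\n".join(lines_buf).strip()
--             current_key = None
--             lines_buf = []
--             continue
--
--         if current_key is not None:
--             lines_buf.append(line)
--
--     if current_key is not None and current_key in field_map:
--         field_map[current_key] = "\n".join(lines_buf).strip()
--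
--     return {
--         "role": field_map["role"],
--         "objective": field_map["objective"],
--         "tasks": field_map["tasks"],
--         "inputs": field_map["inputs"],
--         "expected_output": field_map["expected output"],
--     }
-- ===== SOURCE B (Python) =====
-- def _parse_template_md(text: str) -> dict:
--     """Per-field extraction: for each target field, scan for the LAST matching
--     '## <name>' header and take the lines until the next header/'---' boundary.
--     No shared state machine; each field is located independently."""
--     lines = text.splitlines()
--
--     def section(name):
--         content = ""
--         for i, line in enumerate(lines):
--             s = line.strip()
--             if s.startswith("## ") and s[3:].strip().lower() == name:
--                 buf = []
--                 for nxt in lines[i + 1:]: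
--                     t = nxt.strip()
--                     if t.startswith("## ") or t == "---":
--                         break
--                     buf.append(nxt)
--                 content = "\n".join(buf).strip()
--         return content
--
--     return {
--         "role": section("role"),
--         "objective": section("objective"),
--         "tasks": section("tasks"),
--         "inputs": section("inputs"),
--         "expected_output": section("expected output"),
--     }
-- ===== Notes on version B (the rewrite author's own statement) =====
-- stated objective: alternative
-- what changed: B drops A's single-pass state machine (current_key/buffer with guarded flushes) and instead extracts each of the five fields independently: for each field name it scans the line list for the last matching '## <name>' header and slices out the lines up to the next header/'---' boundary.
import Mathlib
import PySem

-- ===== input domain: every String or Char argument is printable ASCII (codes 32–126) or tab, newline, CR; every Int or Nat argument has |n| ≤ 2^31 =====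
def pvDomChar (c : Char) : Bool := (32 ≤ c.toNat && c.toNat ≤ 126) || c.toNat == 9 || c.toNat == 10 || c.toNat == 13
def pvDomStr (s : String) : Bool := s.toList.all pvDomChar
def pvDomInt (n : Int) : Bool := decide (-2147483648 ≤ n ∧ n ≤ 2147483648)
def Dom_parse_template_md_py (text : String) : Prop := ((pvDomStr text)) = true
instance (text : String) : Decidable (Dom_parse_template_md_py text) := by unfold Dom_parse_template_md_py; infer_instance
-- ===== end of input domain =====

-- B replaces A's single-pass state machine by independent per-field scans: each field is
-- the last matching '## <name>' section, sliced out up to the next boundary (objective: alternative).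

-- ===== PORT A =====
-- state: (field_map, current_key, lines_buf)
def pvStA : Type := PySem.Dict String String × Option String × List String

-- the guarded store 'if current_key is not None and current_key in field_map: field_map[ck] = "\n".join(buf).strip()'
def pvFlushA (fm : PySem.Dict String String) (ck : Option String) (buf : List String) : PySem.Dict String String :=
  match ck with
  | some k => if fm.contains k then fm.insert k (PySem.Str.strip (PySem.Str.join "\n" buf)) else fm
  | none => fm

def pvStepA (st : pvStA) (line : String) : pvStA :=
  let stripped := PySem.Str.strip line
  if PySem.Str.startswith stripped "## " then
    let fm := pvFlushA st.1 st.2.1 st.2.2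
    let header := PySem.Str.lower (PySem.Str.strip (PySem.Str.slice stripped (some 3) none))
    if header == "prompt" then (fm, none, [])
    else (fm, some header, [])
  else if stripped == "---" then
    (pvFlushA st.1 st.2.1 st.2.2, none, [])
  else
    match st.2.1 with
    | some _ => (st.1, st.2.1, st.2.2 ++ [line])
    | none => st

-- the trailing flush and the final 'return {...}' of A
def pvFinishA (st : pvStA) : List (String × String) :=
  let fm := pvFlushA st.1 st.2.1 st.2.2
  [("role", fm.getD "role" ""), ("objective", fm.getD "objective" ""), ("tasks", fm.getD "tasks" ""),
   ("inputs", fm.getD "inputs" ""), ("expected_output", fm.getD "expected output" "")]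

def parse_template_md_py (text : String) : List (String × String) :=
  pvFinishA ((PySem.Str.splitlines text).foldl pvStepA
    (PySem.Dict.ofList [("role", ""), ("objective", ""), ("tasks", ""), ("inputs", ""), ("expected output", "")], none, []))

-- ===== PORT B =====
-- inner loop: collect the lines of a section until the next '## '/'---' boundary ('break')
def pvCollect : List String → List String
  | [] => []
  | l :: ls =>
    let t := PySem.Str.strip l
    if PySem.Str.startswith t "## " || t == "---" then []
    else l :: pvCollect ls

-- outer loop of 'section(name)': scan all lines, overwrite 'content' at each matching header
def pvSectionLoop (name : String) (content : String) : List String → String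
  | [] => content
  | l :: ls =>
    let s := PySem.Str.strip l
    if PySem.Str.startswith s "## " &&
       (PySem.Str.lower (PySem.Str.strip (PySem.Str.slice s (some 3) none)) == name) then
      pvSectionLoop name (PySem.Str.strip (PySem.Str.join "\n" (pvCollect ls))) ls
    else
      pvSectionLoop name content ls

def pvSection (lines : List String) (name : String) : String := pvSectionLoop name "" lines

def parse_template_md_py_alt (text : String) : List (String × String) :=
  let lines := PySem.Str.splitlines text
  [("role", pvSection lines "role"), ("objective", pvSection lines "objective"),
   ("tasks", pvSection lines "tasks"), ("inputs", pvSection lines "inputs"),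
   ("expected_output", pvSection lines "expected output")]

-- ===== PRECONDITION & SPEC =====
def Spec_parse_template_md_py (text : String) (out : List (String × String)) : Prop := out = parse_template_md_py_alt text
instance (text : String) (out : List (String × String)) : Decidable (Spec_parse_template_md_py text out) := by unfold Spec_parse_template_md_py; infer_instance

-- ===== CLAIM (what is proved, stated in full; the proofs are below) =====
def Claim_equal_parse_template_md_py : Prop := ∀ (text : String), Dom_parse_template_md_py text → Spec_parse_template_md_py text (parse_template_md_py text)

-- ===== LEMMAS AND PROOFS =====

def pvMkFM (r o t i e : String) : PySem.Dict String String :=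
  PySem.Dict.mk [("role", r), ("objective", o), ("tasks", t), ("inputs", i), ("expected output", e)]

def pvKeys : List String := ["role", "objective", "tasks", "inputs", "expected output"]

def pvShape (fm : PySem.Dict String String) : Prop := ∃ r o t i e, fm = pvMkFM r o t i e

-- the lowercase header extracted from a '## ' line (abbreviation for the proofs)
def pvHdr (l : String) : String :=
  PySem.Str.lower (PySem.Str.strip (PySem.Str.slice (PySem.Str.strip l) (some 3) none))

-- the initial 'content' of B's per-key scan that matches A's pending state
def pvInit (fm : PySem.Dict String String) (ck : Option String) (k : String)
    (buf lines : List String) : String :=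
  if ck = some k then PySem.Str.strip (PySem.Str.join "\n" (buf ++ pvCollect lines))
  else fm.getD k ""

theorem pvFlushA_none (fm : PySem.Dict String String) (buf : List String) :
    pvFlushA fm none buf = fm := rfl

theorem pvFlushA_some (fm : PySem.Dict String String) (k : String) (buf : List String) :
    pvFlushA fm (some k) buf =
      if fm.contains k then fm.insert k (PySem.Str.strip (PySem.Str.join "\n" buf)) else fm := rfl

theorem pvMkFM_contains_iff (r o t i e : String) (k : String) :
    (pvMkFM r o t i e).contains k = true ↔ k ∈ pvKeys := by
  simp only [pvMkFM, pvKeys, PySem.Dict.contains_mk, List.any_cons, List.any_nil,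
    Bool.or_eq_true, beq_iff_eq, Bool.false_eq_true, or_false, List.mem_cons,
    List.not_mem_nil]
  constructor
  · rintro (h | h | h | h | h) <;> simp [h.symm]
  · rintro (h | h | h | h | h) <;> simp [h]

theorem pvMkFM_insert_shape (r o t i e : String) (k v : String) (hk : k ∈ pvKeys) :
    pvShape ((pvMkFM r o t i e).insert k v) := by
  fin_cases hk
  · exact ⟨v, o, t, i, e, rfl⟩
  · exact ⟨r, v, t, i, e, rfl⟩
  · exact ⟨r, o, v, i, e, rfl⟩
  · exact ⟨r, o, t, v, e, rfl⟩
  · exact ⟨r, o, t, i, v, rfl⟩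

theorem pvFlushA_shape (fm : PySem.Dict String String) (ck : Option String) (buf : List String)
    (h : pvShape fm) : pvShape (pvFlushA fm ck buf) := by
  obtain ⟨r, o, t, i, e, rfl⟩ := h
  cases ck with
  | none => exact ⟨r, o, t, i, e, rfl⟩
  | some k =>
    rw [pvFlushA_some]
    by_cases hc : (pvMkFM r o t i e).contains k = true
    · rw [if_pos hc]
      exact pvMkFM_insert_shape r o t i e k _ ((pvMkFM_contains_iff r o t i e k).mp hc)
    · rw [if_neg hc]
      exact ⟨r, o, t, i, e, rfl⟩

-- flushing into the current key sets exactly that key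
theorem pvFlushA_getD_self (fm : PySem.Dict String String) (k : String) (buf : List String)
    (hsh : pvShape fm) (hk : k ∈ pvKeys) :
    (pvFlushA fm (some k) buf).getD k "" = PySem.Str.strip (PySem.Str.join "\n" buf) := by
  obtain ⟨r, o, t, i, e, rfl⟩ := hsh
  rw [pvFlushA_some, if_pos ((pvMkFM_contains_iff r o t i e k).mpr hk),
    PySem.Dict.getD_insert_self]

-- flushing into a different (or no) key leaves k's value alone
theorem pvFlushA_getD_other (fm : PySem.Dict String String) (ck : Option String)
    (buf : List String) (k : String) (hne : ck ≠ some k) :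
    (pvFlushA fm ck buf).getD k "" = fm.getD k "" := by
  cases ck with
  | none => rfl
  | some k' =>
    have hkk : k ≠ k' := by intro h; exact hne (by rw [h])
    rw [pvFlushA_some]
    by_cases hc : fm.contains k' = true
    · rw [if_pos hc, PySem.Dict.getD_insert_of_ne _ _ _ hkk]
    · rw [if_neg hc]

-- one-step unfoldings of A's loop body
theorem pvStepA_hdr_prompt (st : pvStA) (l : String)
    (h1 : PySem.Str.startswith (PySem.Str.strip l) "## " = true)
    (hp : (pvHdr l == "prompt") = true) :
    pvStepA st l = (pvFlushA st.1 st.2.1 st.2.2, none, []) := by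
  simp only [pvHdr] at hp
  simp only [pvStepA]
  rw [if_pos h1, if_pos hp]

theorem pvStepA_hdr (st : pvStA) (l : String)
    (h1 : PySem.Str.startswith (PySem.Str.strip l) "## " = true)
    (hp : (pvHdr l == "prompt") = false) :
    pvStepA st l = (pvFlushA st.1 st.2.1 st.2.2, some (pvHdr l), []) := by
  simp only [pvHdr] at hp ⊢
  simp only [pvStepA]
  rw [if_pos h1, if_neg (by rw [hp]; simp)]

theorem pvStepA_sep (st : pvStA) (l : String)
    (h1 : ¬ PySem.Str.startswith (PySem.Str.strip l) "## " = true)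
    (h2 : (PySem.Str.strip l == "---") = true) :
    pvStepA st l = (pvFlushA st.1 st.2.1 st.2.2, none, []) := by
  simp only [pvStepA]
  rw [if_neg h1, if_pos h2]

theorem pvStepA_plain (fm : PySem.Dict String String) (ck : Option String)
    (buf : List String) (l : String)
    (h1 : ¬ PySem.Str.startswith (PySem.Str.strip l) "## " = true)
    (h2 : ¬ (PySem.Str.strip l == "---") = true) :
    pvStepA (fm, ck, buf) l =
      (match ck with | some _ => (fm, ck, buf ++ [l]) | none => (fm, ck, buf)) := by
  simp only [pvStepA]
  rw [if_neg h1, if_neg h2]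

-- one-step unfoldings of B's loops
theorem pvCollect_boundary (l : String) (ls : List String)
    (h : (PySem.Str.startswith (PySem.Str.strip l) "## " || (PySem.Str.strip l == "---")) = true) :
    pvCollect (l :: ls) = [] := by
  conv_lhs => rw [pvCollect]
  rw [if_pos h]

theorem pvCollect_plain (l : String) (ls : List String)
    (h : ¬ (PySem.Str.startswith (PySem.Str.strip l) "## " || (PySem.Str.strip l == "---")) = true) :
    pvCollect (l :: ls) = l :: pvCollect ls := by
  conv_lhs => rw [pvCollect]
  rw [if_neg h]

theorem pvSectionLoop_match (name c : String) (l : String) (ls : List String)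
    (h : (PySem.Str.startswith (PySem.Str.strip l) "## " && (pvHdr l == name)) = true) :
    pvSectionLoop name c (l :: ls) =
      pvSectionLoop name (PySem.Str.strip (PySem.Str.join "\n" (pvCollect ls))) ls := by
  simp only [pvHdr] at h
  conv_lhs => rw [pvSectionLoop]
  rw [if_pos h]

theorem pvSectionLoop_skip (name c : String) (l : String) (ls : List String)
    (h : (PySem.Str.startswith (PySem.Str.strip l) "## " && (pvHdr l == name)) = false) :
    pvSectionLoop name c (l :: ls) = pvSectionLoop name c ls := by
  simp only [pvHdr] at h
  conv_lhs => rw [pvSectionLoop]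
  rw [if_neg (by rw [h]; simp)]

-- evaluations of the pending-content seed
theorem pvInit_none (fm : PySem.Dict String String) (k : String) (buf lines : List String) :
    pvInit fm none k buf lines = fm.getD k "" := by
  unfold pvInit; rw [if_neg (by simp)]

theorem pvInit_some_self (fm : PySem.Dict String String) (k : String) (buf lines : List String) :
    pvInit fm (some k) k buf lines =
      PySem.Str.strip (PySem.Str.join "\n" (buf ++ pvCollect lines)) := by
  unfold pvInit; rw [if_pos rfl]

theorem pvInit_some_other (fm : PySem.Dict String String) (k' k : String)
    (buf lines : List String) (hkk : k' ≠ k) :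
    pvInit fm (some k') k buf lines = fm.getD k "" := by
  unfold pvInit; rw [if_neg (by intro h; exact hkk (Option.some.inj h))]

-- at a boundary line, A's flushed value of k is exactly B's pending content
theorem pvInit_boundary (fm : PySem.Dict String String) (ck : Option String) (k : String)
    (buf : List String) (l : String) (ls : List String) (hsh : pvShape fm) (hk : k ∈ pvKeys)
    (hb : (PySem.Str.startswith (PySem.Str.strip l) "## " || (PySem.Str.strip l == "---")) = true) :
    (pvFlushA fm ck buf).getD k "" = pvInit fm ck k buf (l :: ls) := by
  cases ck with
  | none => rw [pvInit_none, pvFlushA_none]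
  | some k' =>
    by_cases hkk : k' = k
    · subst hkk
      rw [pvInit_some_self, pvFlushA_getD_self fm k' buf hsh hk, pvCollect_boundary l ls hb]
      simp
    · rw [pvInit_some_other fm k' k buf _ hkk,
        pvFlushA_getD_other fm (some k') buf k (by intro h; exact hkk (Option.some.inj h))]

-- MAIN INVARIANT: A's final value of key k is B's per-key scan seeded with A's pending content
theorem pvKeyChar (k : String) (hk : k ∈ pvKeys) :
    ∀ (lines : List String) (fm : PySem.Dict String String) (ck : Option String)
      (buf : List String), pvShape fm →
      (let st := lines.foldl pvStepA (fm, ck, buf)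
       (pvFlushA st.1 st.2.1 st.2.2).getD k "") =
        pvSectionLoop k (pvInit fm ck k buf lines) lines := by
  intro lines
  induction lines with
  | nil =>
    intro fm ck buf hsh
    simp only [List.foldl_nil, pvSectionLoop]
    cases ck with
    | none => rw [pvInit_none, pvFlushA_none]
    | some k' =>
      by_cases hkk : k' = k
      · subst hkk
        rw [pvInit_some_self, pvFlushA_getD_self fm k' buf hsh hk]
        simp [pvCollect]
      · rw [pvInit_some_other fm k' k buf _ hkk,
          pvFlushA_getD_other fm (some k') buf k (by intro h; exact hkk (Option.some.inj h))]
  | cons l ls ih =>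
    intro fm ck buf hsh
    simp only [List.foldl_cons]
    have hshape' : pvShape (pvFlushA fm ck buf) := pvFlushA_shape fm ck buf hsh
    by_cases h1 : PySem.Str.startswith (PySem.Str.strip l) "## " = true
    · have hbd : (PySem.Str.startswith (PySem.Str.strip l) "## " || (PySem.Str.strip l == "---")) = true := by
        rw [h1]; rfl
      have hc0 := pvInit_boundary fm ck k buf l ls hsh hk hbd
      by_cases h2 : (pvHdr l == k) = true
      · have hkeq : pvHdr l = k := eq_of_beq h2
        have hnp : (pvHdr l == "prompt") = false := by
          rw [hkeq]
          fin_cases hk <;> decide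
        rw [pvStepA_hdr _ _ h1 hnp, hkeq,
          pvSectionLoop_match k _ l ls (by rw [h1, hkeq]; simp),
          ih (pvFlushA fm ck buf) (some k) [] hshape',
          pvInit_some_self, List.nil_append]
      · have hskip : (PySem.Str.startswith (PySem.Str.strip l) "## " && (pvHdr l == k)) = false := by
          rw [h1]
          simpa using h2
        rw [pvSectionLoop_skip k _ l ls hskip]
        by_cases hp : (pvHdr l == "prompt") = true
        · rw [pvStepA_hdr_prompt _ _ h1 hp,
            ih (pvFlushA fm ck buf) none [] hshape', pvInit_none, hc0]
        · rw [pvStepA_hdr _ _ h1 (by simpa using hp),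
            ih (pvFlushA fm ck buf) (some (pvHdr l)) [] hshape',
            pvInit_some_other _ _ _ _ _ (by intro h; exact h2 (by simp [h])), hc0]
    · have h1f : PySem.Str.startswith (PySem.Str.strip l) "## " = false :=
        Bool.eq_false_iff.mpr h1
      by_cases h2 : (PySem.Str.strip l == "---") = true
      · have hbd : (PySem.Str.startswith (PySem.Str.strip l) "## " || (PySem.Str.strip l == "---")) = true := by
          rw [h2, Bool.or_true]
        rw [pvStepA_sep _ _ h1 h2,
          pvSectionLoop_skip k _ l ls (by rw [h1f, Bool.false_and]),
          ih (pvFlushA fm ck buf) none [] hshape', pvInit_none,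
          pvInit_boundary fm ck k buf l ls hsh hk hbd]
      · have hplain : pvCollect (l :: ls) = l :: pvCollect ls :=
          pvCollect_plain l ls (by simp only [Bool.or_eq_true, not_or]; exact ⟨h1, h2⟩)
        rw [pvStepA_plain fm ck buf l h1 h2,
          pvSectionLoop_skip k _ l ls (by rw [h1f, Bool.false_and])]
        cases ck with
        | none =>
          rw [ih fm none buf hsh, pvInit_none, pvInit_none]
        | some k' =>
          rw [ih fm (some k') (buf ++ [l]) hsh]
          by_cases hkk : k' = k
          · subst hkk
            rw [pvInit_some_self, pvInit_some_self, hplain]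
            simp
          · rw [pvInit_some_other _ _ _ _ _ hkk, pvInit_some_other _ _ _ _ _ hkk]

-- ===== VERDICT (by name: the statement is the Claim_ definition above) =====
theorem parse_template_md_py_spec : Claim_equal_parse_template_md_py := by
  intro text _
  unfold Spec_parse_template_md_py parse_template_md_py parse_template_md_py_alt pvFinishA pvSection
  have hsh : pvShape (PySem.Dict.ofList
      [("role", ""), ("objective", ""), ("tasks", ""), ("inputs", ""), ("expected output", "")]) :=
    ⟨"", "", "", "", "", rfl⟩
  have hgd0 : ∀ k ∈ pvKeys, (PySem.Dict.ofList
      [("role", ""), ("objective", ""), ("tasks", ""), ("inputs", ""), ("expected output", "")]).getD k "" = "" := by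
    intro k hk
    fin_cases hk <;> rfl
  have key : ∀ k ∈ pvKeys,
      (let st := (PySem.Str.splitlines text).foldl pvStepA
        (PySem.Dict.ofList [("role", ""), ("objective", ""), ("tasks", ""), ("inputs", ""), ("expected output", "")], none, [])
       (pvFlushA st.1 st.2.1 st.2.2).getD k "") =
        pvSectionLoop k "" (PySem.Str.splitlines text) := by
    intro k hk
    rw [pvKeyChar k hk (PySem.Str.splitlines text) _ none [] hsh, pvInit_none, hgd0 k hk]
  simp only
  rw [key "role" (by simp [pvKeys]), key "objective" (by simp [pvKeys]),
    key "tasks" (by simp [pvKeys]), key "inputs" (by simp [pvKeys]),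
    key "expected output" (by simp [pvKeys])]
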